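-- pv_equiv track=rewrite | github.com/julisunkan/CareerSpark | utils/resume_generator.py | prioritize_relevant_skills
-- ===== SOURCE A (Python) =====
-- from typing import Dict, List, Any
--
-- def prioritize_relevant_skills(skills: List[str], job_skills: List[str]) -> List[str]:
--     """Prioritize skills based on job requirements"""
--     if not job_skills:
--         return skills
--
--     relevant_skills = []
--     other_skills = []
--
--     for skill in skills:
--         if any(job_skill.lower() in skill.lower() for job_skill in job_skills):
--             relevant_skills.append(skill)
--         else:
--             other_skills.append(skill)
--
--     # Return relevant skills first
--     return relevant_skills + other_skills
-- ===== SOURCE B (Python) =====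
-- def prioritize_relevant_skills(skills, job_skills):
--     """Prioritize skills based on job requirements"""
--     if not job_skills:
--         return skills
--     # Stable sort by relevance: matching skills (key False) come first,
--     # stability keeps the original order inside each group.
--     return sorted(skills, key=lambda s: not any(js.lower() in s.lower() for js in job_skills))
-- ===== Notes on version B (the rewrite author's own statement) =====
-- stated objective: idiomatic
-- what changed: Replaces the two-accumulator partition loop with a single stable sort keyed by the boolean 'not relevant', whose stability reproduces relevant-first order.
import Mathlib
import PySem

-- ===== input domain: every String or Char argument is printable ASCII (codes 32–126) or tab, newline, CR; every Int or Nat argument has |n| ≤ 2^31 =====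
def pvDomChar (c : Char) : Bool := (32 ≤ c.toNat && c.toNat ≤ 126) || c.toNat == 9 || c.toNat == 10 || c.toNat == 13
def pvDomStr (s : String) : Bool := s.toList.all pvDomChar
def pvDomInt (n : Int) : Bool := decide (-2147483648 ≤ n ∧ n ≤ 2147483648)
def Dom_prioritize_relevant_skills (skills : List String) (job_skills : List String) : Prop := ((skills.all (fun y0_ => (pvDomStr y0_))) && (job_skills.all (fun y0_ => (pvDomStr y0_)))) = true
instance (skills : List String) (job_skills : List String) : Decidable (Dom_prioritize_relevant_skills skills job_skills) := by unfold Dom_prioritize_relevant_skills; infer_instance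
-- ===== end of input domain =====

-- B replaces A's two-accumulator partition loop with one stable sort by the boolean key
-- "not relevant"; stability keeps original order inside each group (objective: idiomatic).

-- ===== PORT A =====
-- any(job_skill.lower() in skill.lower() for job_skill in job_skills)
def pvRelevant (job_skills : List String) (skill : String) : Bool :=
  job_skills.any (fun job_skill => PySem.Str.isIn (PySem.Str.lower job_skill) (PySem.Str.lower skill))

def prioritize_relevant_skills (skills : List String) (job_skills : List String) : List String :=
  if job_skills = [] then skills
  else
    let p := skills.foldl
      (fun (acc : List String × List String) skill =>
        if pvRelevant job_skills skill then (acc.1 ++ [skill], acc.2)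
        else (acc.1, acc.2 ++ [skill]))
      ([], [])
    p.1 ++ p.2

-- ===== PORT B =====
def prioritize_relevant_skills_alt (skills : List String) (job_skills : List String) : List String :=
  if job_skills = [] then skills
  else
    PySem.List.sorted skills
      (fun s => !(job_skills.any (fun js => PySem.Str.isIn (PySem.Str.lower js) (PySem.Str.lower s)))) false

-- ===== PRECONDITION & SPEC =====
def Spec_prioritize_relevant_skills (skills : List String) (job_skills : List String) (out : List String) : Prop := out = prioritize_relevant_skills_alt skills job_skills
instance (skills : List String) (job_skills : List String) (out : List String) : Decidable (Spec_prioritize_relevant_skills skills job_skills out) := by unfold Spec_prioritize_relevant_skills; infer_instance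

-- ===== CLAIM (what is proved, stated in full; the proofs are below) =====
def Claim_equal_prioritize_relevant_skills : Prop := ∀ (skills : List String) (job_skills : List String), Dom_prioritize_relevant_skills skills job_skills → Spec_prioritize_relevant_skills skills job_skills (prioritize_relevant_skills skills job_skills)

-- ===== LEMMAS AND PROOFS =====

-- insertBy with a boolean key: an all-true suffix receives x (key false) at its front
theorem insertBy_all_true {α : Type} (key : α → Bool) (x : α) (T : List α)
    (hx : key x = false) (hT : ∀ y ∈ T, key y = true) :
    PySem.List.insertBy (fun a b => decide (key a < key b)) x T = x :: T := by
  cases T with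
  | nil => simp [PySem.List.insertBy]
  | cons t T' => simp [PySem.List.insertBy, hx, hT t (by simp)]

-- insertBy skips an all-not-before prefix
theorem insertBy_append_front {α : Type} (before : α → α → Bool) (x : α) (F T : List α)
    (hF : ∀ y ∈ F, before x y = false) :
    PySem.List.insertBy before x (F ++ T) = F ++ PySem.List.insertBy before x T := by
  induction F with
  | nil => rfl
  | cons f F' ih =>
      simp only [List.cons_append, PySem.List.insertBy, hF f (by simp)]
      simp [ih (fun y hy => hF y (by simp [hy]))]

-- the stable-sort fold keeps the state in shape (falses ++ trues)
theorem sorted_bool_fold {α : Type} (key : α → Bool) :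
    ∀ (xs F T : List α), (∀ y ∈ F, key y = false) → (∀ y ∈ T, key y = true) →
    xs.foldl (fun acc x => PySem.List.insertBy (fun a b => decide (key a < key b)) x acc) (F ++ T)
      = (F ++ xs.filter (fun x => !key x)) ++ (T ++ xs.filter key) := by
  intro xs
  induction xs with
  | nil => intro F T _ _; simp
  | cons x xs ih =>
      intro F T hF hT
      by_cases hx : key x = true
      · have hstep : PySem.List.insertBy (fun a b => decide (key a < key b)) x (F ++ T)
            = (F ++ T) ++ [x] := by
          apply PySem.List.insertBy_of_forall_not_before
          intro y _
          simp [hx]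
        have := ih F (T ++ [x]) hF (by intro y hy; rcases List.mem_append.mp hy with h | h
                                       · exact hT y h
                                       · simp_all)
        simp only [List.foldl_cons, hstep, List.append_assoc] at this ⊢
        simp [this, hx]
      · have hx' : key x = false := by simpa using hx
        have hstep : PySem.List.insertBy (fun a b => decide (key a < key b)) x (F ++ T)
            = (F ++ [x]) ++ T := by
          rw [insertBy_append_front _ _ _ _ (by intro y hy; simp [hx', hF y hy]),
              insertBy_all_true key x T hx' hT]
          simp
        have := ih (F ++ [x]) T (by intro y hy; rcases List.mem_append.mp hy with h | h
                                    · exact hF y h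
                                    · simp_all) hT
        simp only [List.foldl_cons, hstep]
        rw [this]
        simp [hx']

-- stable sort by a boolean key is the stable partition: falses first, then trues
theorem sorted_bool_eq_partition {α : Type} (xs : List α) (key : α → Bool) :
    PySem.List.sorted xs key false
      = xs.filter (fun x => !key x) ++ xs.filter key := by
  rw [PySem.List.sorted_eq_foldl_insertBy]
  simpa using sorted_bool_fold key xs [] [] (by simp) (by simp)

-- A's loop computes the two filters
theorem a_loop_eq_filters (job_skills : List String) :
    ∀ (xs : List String) (r o : List String),
    xs.foldl (fun (acc : List String × List String) skill =>
        if pvRelevant job_skills skill then (acc.1 ++ [skill], acc.2)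
        else (acc.1, acc.2 ++ [skill])) (r, o)
      = (r ++ xs.filter (pvRelevant job_skills), o ++ xs.filter (fun s => !pvRelevant job_skills s)) := by
  intro xs
  induction xs with
  | nil => intro r o; simp
  | cons x xs ih =>
      intro r o
      by_cases hx : pvRelevant job_skills x = true
      · simp [hx, ih]
      · simp only [Bool.not_eq_true] at hx
        simp [hx, ih]

-- ===== VERDICT (by name: the statement is the Claim_ definition above) =====
theorem prioritize_relevant_skills_spec : Claim_equal_prioritize_relevant_skills := by
  intro skills job_skills _
  unfold Spec_prioritize_relevant_skills prioritize_relevant_skills prioritize_relevant_skills_alt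
  by_cases hj : job_skills = []
  · simp [hj]
  · simp only [hj, ite_false]
    rw [sorted_bool_eq_partition, a_loop_eq_filters]
    unfold pvRelevant
    simp
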